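-- pv_equiv track=rewrite | github.com/fernandabackenddeveloper/agent-factory | agent_factory/orchestrator/pool_process.py | schedule_batches
-- ===== SOURCE A (Python) =====
-- from typing import Any, Callable, Dict, List, Set
--
-- def schedule_batches(tasks: List[Dict[str, Any]]) -> List[List[Dict[str, Any]]]:
--     """
--     Greedy batching: tasks in same batch must have disjoint 'touch_hints' sets if present.
--     If no hints, they can run together.
--     """
--     batches: List[List[Dict[str, Any]]] = []
--     for t in tasks:
--         hint = set(t.get("touch_hints") or [])
--         placed = False
--         for b in batches:
--             used = set()
--             for x in b:
--                 used |= set(x.get("touch_hints") or [])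
--             if used.isdisjoint(hint):
--                 b.append(t)
--                 placed = True
--                 break
--         if not placed:
--             batches.append([t])
--     return batches
-- ===== SOURCE B (Python) =====
-- def schedule_batches(tasks):
--     """
--     Greedy first-fit batching via an inverted index: for each hint element we keep
--     the set of batch indices whose batch already touches it, so placing a task
--     never rescans the members of existing batches.
--     """
--     batches = []
--     index = {}  # hint element -> set of batch indices containing it
--     for t in tasks:
--         hints = t.get("touch_hints") or []
--         forbidden = set()
--         for e in hints:
--             forbidden |= index.get(e, set())
--         i = 0
--         while i < len(batches) and i in forbidden:
--             i += 1
--         if i < len(batches):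
--             batches[i].append(t)
--         else:
--             batches.append([t])
--         for e in hints:
--             index.setdefault(e, set()).add(i)
--     return batches
-- ===== Notes on version B (the rewrite author's own statement) =====
-- stated objective: alternative
-- what changed: Replaces the per-task rescan of every member of every batch (rebuilding each batch's union of touch_hints from scratch) with an inverted index from hint element to the set of batch indices touching it; a task's forbidden batch set is the union of its hints' index entries and the task is placed at the first non-forbidden batch index.
import Mathlib
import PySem

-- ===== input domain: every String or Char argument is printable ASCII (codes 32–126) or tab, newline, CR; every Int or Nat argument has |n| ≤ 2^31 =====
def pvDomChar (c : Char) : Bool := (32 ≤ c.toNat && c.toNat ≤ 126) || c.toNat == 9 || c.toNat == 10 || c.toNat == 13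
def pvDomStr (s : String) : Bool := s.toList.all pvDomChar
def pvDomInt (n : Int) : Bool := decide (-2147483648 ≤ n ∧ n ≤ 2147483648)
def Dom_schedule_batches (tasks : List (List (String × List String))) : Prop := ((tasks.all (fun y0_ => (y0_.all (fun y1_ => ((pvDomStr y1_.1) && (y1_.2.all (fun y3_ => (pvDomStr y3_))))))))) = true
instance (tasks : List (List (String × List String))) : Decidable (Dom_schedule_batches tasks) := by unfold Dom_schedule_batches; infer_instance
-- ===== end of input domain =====

-- B replaces A's per-task rescan of every member of every batch with an inverted index
-- from hint element to the set of batch indices touching it (first-fit over indices); objective: alternative.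


-- ===== PORT A =====
-- t.get("touch_hints") or []   (a missing key gives None → []; an empty list is falsy → [])
def pvHints (t : List (String × List String)) : List String :=
  ((PySem.Dict.mk t).get? "touch_hints").getD []

-- used = set(); for x in b: used |= set(x.get("touch_hints") or [])
def pvUsed (b : List (List (String × List String))) : PySem.Set String :=
  b.foldl (fun used x => PySem.Set.union used (PySem.Set.ofList (pvHints x))) PySem.Set.empty

-- the inner 'for b in batches: … break' with in-place b.append(t)
def pvPlace (t : List (String × List String)) (hint : PySem.Set String) :
    List (List (List (String × List String))) → Option (List (List (List (String × List String))))
  | [] => none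
  | b :: rest =>
    if PySem.Set.isdisjoint (pvUsed b) hint then some ((b ++ [t]) :: rest)
    else
      match pvPlace t hint rest with
      | some r => some (b :: r)
      | none => none

def pvAStep (batches : List (List (List (String × List String)))) (t : List (String × List String)) :
    List (List (List (String × List String))) :=
  match pvPlace t (PySem.Set.ofList (pvHints t)) batches with
  | some r => r
  | none => batches ++ [[t]]

def schedule_batches (tasks : List (List (String × List String))) : List (List (List (String × List String))) :=
  tasks.foldl pvAStep []

-- ===== PORT B =====
-- forbidden = set(); for e in hints: forbidden |= index.get(e, set())
def pvForbidden (index : PySem.Dict String (PySem.Set Nat)) (hints : List String) : PySem.Set Nat :=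
  hints.foldl (fun acc e => PySem.Set.union acc (index.getD e PySem.Set.empty)) PySem.Set.empty

-- while i < n and i in forbidden: i += 1
def pvScan (forbidden : PySem.Set Nat) (n : Nat) (i : Nat) : Nat :=
  if h : i < n ∧ PySem.Set.contains forbidden i = true then pvScan forbidden n (i + 1) else i
  termination_by n - i
  decreasing_by omega

def pvBStep (st : List (List (List (String × List String))) × PySem.Dict String (PySem.Set Nat))
    (t : List (String × List String)) :
    List (List (List (String × List String))) × PySem.Dict String (PySem.Set Nat) :=
  let hints := pvHints t
  let forbidden := pvForbidden st.2 hints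
  let i := pvScan forbidden st.1.length 0
  let batches := if i < st.1.length then st.1.set i (st.1.getD i [] ++ [t]) else st.1 ++ [[t]]
  -- for e in hints: index.setdefault(e, set()).add(i)
  let index := hints.foldl (fun d e => d.modify e PySem.Set.empty (fun s => PySem.Set.add s i)) st.2
  (batches, index)

def schedule_batches_alt (tasks : List (List (String × List String))) : List (List (List (String × List String))) :=
  (tasks.foldl pvBStep ([], PySem.Dict.empty)).1

-- ===== PRECONDITION & SPEC =====
def Spec_schedule_batches (tasks : List (List (String × List String))) (out : List (List (List (String × List String)))) : Prop := out = schedule_batches_alt tasks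
instance (tasks : List (List (String × List String))) (out : List (List (List (String × List String)))) : Decidable (Spec_schedule_batches tasks out) := by unfold Spec_schedule_batches; infer_instance

-- ===== CLAIM (what is proved, stated in full; the proofs are below) =====
def Claim_equal_schedule_batches : Prop := ∀ (tasks : List (List (String × List String))), Dom_schedule_batches tasks → Spec_schedule_batches tasks (schedule_batches tasks)

-- ===== LEMMAS AND PROOFS =====

-- B's index is a faithful inverted view of A's per-batch hint unions
def pvInv (bs : List (List (List (String × List String)))) (idx : PySem.Dict String (PySem.Set Nat)) : Prop :=
  ∀ (e : String) (i : Nat),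
    i ∈ PySem.Dict.getD idx e PySem.Set.empty ↔ ∃ h : i < bs.length, e ∈ pvUsed bs[i]

theorem mem_foldl_union {α β : Type} [BEq α] [LawfulBEq α] (f : β → List α) (l : List β)
    (s : PySem.Set α) (y : α) :
    y ∈ l.foldl (fun acc x => PySem.Set.union acc (f x)) s ↔ y ∈ s ∨ ∃ x ∈ l, y ∈ f x := by
  induction l generalizing s with
  | nil => simp
  | cons b l ih => simp [ih, PySem.Set.mem_union]; tauto

theorem mem_pvUsed (e : String) (b : List (List (String × List String))) :
    e ∈ pvUsed b ↔ ∃ x ∈ b, e ∈ pvHints x := by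
  simpa [pvUsed, PySem.Set.mem_ofList] using
    mem_foldl_union (fun x => PySem.Set.ofList (pvHints x)) b PySem.Set.empty e

theorem mem_pvForbidden (i : Nat) (idx : PySem.Dict String (PySem.Set Nat)) (hints : List String) :
    i ∈ pvForbidden idx hints ↔ ∃ e ∈ hints, i ∈ idx.getD e PySem.Set.empty := by
  simpa [pvForbidden] using
    mem_foldl_union (fun e => idx.getD e PySem.Set.empty) hints PySem.Set.empty i

-- A's inner loop is first-fit at index findIdx
theorem pvPlace_eq (t : List (String × List String)) (hint : PySem.Set String)
    (bs : List (List (List (String × List String)))) :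
    pvPlace t hint bs =
      if bs.findIdx (fun b => PySem.Set.isdisjoint (pvUsed b) hint) < bs.length then
        some (bs.set (bs.findIdx (fun b => PySem.Set.isdisjoint (pvUsed b) hint))
          (bs.getD (bs.findIdx (fun b => PySem.Set.isdisjoint (pvUsed b) hint)) [] ++ [t]))
      else none := by
  induction bs with
  | nil => simp [pvPlace]
  | cons b rest ih =>
    by_cases hp : PySem.Set.isdisjoint (pvUsed b) hint
    · simp [pvPlace, hp, List.findIdx_cons]
    · simp only [pvPlace, hp, List.findIdx_cons, Bool.false_eq_true, if_false, cond_false, ih]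
      by_cases hlt : rest.findIdx (fun b => PySem.Set.isdisjoint (pvUsed b) hint) < rest.length
      · simp [hlt, List.set, List.getD]
      · simp [hlt]

-- B's while loop finds the same index
theorem pvScan_eq (hint : PySem.Set String) (f : PySem.Set Nat)
    (bs : List (List (List (String × List String)))) (i0 : Nat)
    (H : ∀ k, (PySem.Set.contains f (i0 + k) = true ↔
        ∃ hk : k < bs.length, ¬ PySem.Set.isdisjoint (pvUsed bs[k]) hint = true)) :
    pvScan f (i0 + bs.length) i0 = i0 + bs.findIdx (fun b => PySem.Set.isdisjoint (pvUsed b) hint) := by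
  induction bs generalizing i0 with
  | nil =>
    rw [pvScan]; simp
  | cons b rest ih =>
    have h0 := H 0
    simp only [Nat.add_zero, List.length_cons, List.getElem_cons_zero] at h0
    by_cases hp : PySem.Set.isdisjoint (pvUsed b) hint
    · have hnot : ¬ PySem.Set.contains f i0 = true := by
        rw [h0]; rintro ⟨-, hc⟩; exact hc hp
      rw [pvScan, dif_neg (fun h => hnot h.2)]
      simp [List.findIdx_cons, hp]
    · have hin : PySem.Set.contains f i0 = true := by
        rw [h0]; exact ⟨by omega, by simp [hp]⟩
      rw [pvScan]
      rw [dif_pos ⟨by simp only [List.length_cons]; omega, hin⟩]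
      have H' : ∀ k, (PySem.Set.contains f ((i0 + 1) + k) = true ↔
          ∃ hk : k < rest.length, ¬ PySem.Set.isdisjoint (pvUsed rest[k]) hint = true) := by
        intro k
        have := H (k + 1)
        simpa [Nat.add_comm, Nat.add_left_comm, Nat.add_assoc] using this
      have := ih (i0 + 1) H'
      simp only [List.length_cons]
      rw [show i0 + (rest.length + 1) = (i0 + 1) + rest.length by omega, this]
      simp [List.findIdx_cons, hp]; omega

-- the index-update loop adds exactly j to each hint's entry
theorem getD_index_update (hints : List String) (idx : PySem.Dict String (PySem.Set Nat))
    (j : Nat) (e : String) (i : Nat) :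
    i ∈ (hints.foldl (fun d e => d.modify e PySem.Set.empty (fun s => PySem.Set.add s j)) idx).getD e PySem.Set.empty ↔
      i ∈ idx.getD e PySem.Set.empty ∨ (e ∈ hints ∧ i = j) := by
  induction hints generalizing idx with
  | nil => simp
  | cons e' rest ih =>
    simp only [List.foldl_cons, ih, List.mem_cons]
    rw [PySem.Dict.getD_modify]
    by_cases he : e = e'
    · subst he; simp [PySem.Set.mem_add]; tauto
    · simp [he]

theorem mem_pvUsed_append1 (e : String) (b : List (List (String × List String)))
    (x : List (String × List String)) :
    e ∈ pvUsed (b ++ [x]) ↔ e ∈ pvUsed b ∨ e ∈ pvHints x := by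
  simp [mem_pvUsed]
  constructor
  · rintro ⟨y, hy | rfl, hp⟩
    · exact Or.inl ⟨y, hy, hp⟩
    · exact Or.inr hp
  · rintro (⟨y, hy, hp⟩ | hp)
    · exact ⟨y, Or.inl hy, hp⟩
    · exact ⟨x, Or.inr rfl, hp⟩

theorem pvStep_fst (t : List (String × List String)) (bs : List (List (List (String × List String))))
    (idx : PySem.Dict String (PySem.Set Nat)) (hInv : pvInv bs idx) :
    (pvBStep (bs, idx) t).1 = pvAStep bs t ∧ pvInv (pvBStep (bs, idx) t).1 (pvBStep (bs, idx) t).2 := by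
  have Hk : ∀ k, (PySem.Set.contains (pvForbidden idx (pvHints t)) (0 + k) = true ↔
      ∃ hk : k < bs.length, ¬ PySem.Set.isdisjoint (pvUsed bs[k]) (PySem.Set.ofList (pvHints t)) = true) := by
    intro k
    rw [Nat.zero_add, PySem.Set.contains_iff, mem_pvForbidden]
    constructor
    · rintro ⟨e, he, hi⟩
      obtain ⟨hk, hu⟩ := (hInv e k).1 hi
      refine ⟨hk, fun hd => ?_⟩
      rw [PySem.Set.isdisjoint_iff] at hd
      exact hd e hu ((PySem.Set.mem_ofList _ _).mpr he)
    · rintro ⟨hk, hnd⟩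
      have hex : ∃ e ∈ pvUsed bs[k], e ∈ PySem.Set.ofList (pvHints t) := by
        by_contra hc
        exact hnd ((PySem.Set.isdisjoint_iff _ _).mpr (fun x hx hmem => hc ⟨x, hx, hmem⟩))
      obtain ⟨e, hu, hh⟩ := hex
      exact ⟨e, (PySem.Set.mem_ofList _ _).mp hh, (hInv e k).2 ⟨hk, hu⟩⟩
  have hscan : pvScan (pvForbidden idx (pvHints t)) bs.length 0 =
      bs.findIdx (fun b => PySem.Set.isdisjoint (pvUsed b) (PySem.Set.ofList (pvHints t))) := by
    simpa using pvScan_eq (PySem.Set.ofList (pvHints t)) (pvForbidden idx (pvHints t)) bs 0 Hk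
  have hj_le : bs.findIdx (fun b => PySem.Set.isdisjoint (pvUsed b) (PySem.Set.ofList (pvHints t))) ≤ bs.length :=
    List.findIdx_le_length
  constructor
  · simp only [pvBStep, pvAStep, pvPlace_eq, hscan]
    by_cases hlt : bs.findIdx (fun b => PySem.Set.isdisjoint (pvUsed b) (PySem.Set.ofList (pvHints t))) < bs.length
    · simp [hlt]
    · simp [hlt]
  · intro e i
    simp only [pvBStep, hscan]
    rw [getD_index_update, hInv e i]
    by_cases hlt : bs.findIdx (fun b => PySem.Set.isdisjoint (pvUsed b) (PySem.Set.ofList (pvHints t))) < bs.length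
    · simp only [if_pos hlt, List.length_set]
      have hgd : bs.getD (bs.findIdx (fun b => PySem.Set.isdisjoint (pvUsed b) (PySem.Set.ofList (pvHints t)))) [] = bs[bs.findIdx (fun b => PySem.Set.isdisjoint (pvUsed b) (PySem.Set.ofList (pvHints t)))]'hlt :=
        List.getD_eq_getElem _ _ hlt
      constructor
      · rintro (⟨h, hu⟩ | ⟨hh, rfl⟩)
        · refine ⟨h, ?_⟩
          rw [List.getElem_set]
          split
          · next hij => subst hij; rw [hgd]; exact (mem_pvUsed_append1 _ _ _).mpr (Or.inl hu)
          · exact hu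
        · refine ⟨hlt, ?_⟩
          rw [List.getElem_set, if_pos rfl]
          exact (mem_pvUsed_append1 _ _ _).mpr (Or.inr hh)
      · rintro ⟨h, hu⟩
        rw [List.getElem_set] at hu
        by_cases hij : bs.findIdx (fun b => PySem.Set.isdisjoint (pvUsed b) (PySem.Set.ofList (pvHints t))) = i
        · rw [if_pos hij, hgd] at hu
          rcases (mem_pvUsed_append1 _ _ _).mp hu with hu' | hh
          · subst hij; exact Or.inl ⟨h, hu'⟩
          · exact Or.inr ⟨hh, hij.symm⟩
        · rw [if_neg hij] at hu
          exact Or.inl ⟨h, hu⟩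
    · have hj : bs.findIdx (fun b => PySem.Set.isdisjoint (pvUsed b) (PySem.Set.ofList (pvHints t))) = bs.length := by
        omega
      simp only [if_neg hlt]
      simp only [List.length_append, List.length_singleton, hj]
      constructor
      · rintro (⟨h, hu⟩ | ⟨hh, rfl⟩)
        · exact ⟨by omega, by rw [List.getElem_append_left h]; exact hu⟩
        · refine ⟨by omega, ?_⟩
          rw [List.getElem_append_right (by omega)]
          simp [mem_pvUsed, hh]
      · rintro ⟨h, hu⟩
        by_cases hi : i < bs.length
        · rw [List.getElem_append_left hi] at hu
          exact Or.inl ⟨hi, hu⟩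
        · have hi' : i = bs.length := by omega
          subst hi'
          rw [List.getElem_append_right (by omega)] at hu
          simp [mem_pvUsed] at hu
          exact Or.inr ⟨hu, rfl⟩

theorem fold_eq (tasks : List (List (String × List String)))
    (bs : List (List (List (String × List String)))) (idx : PySem.Dict String (PySem.Set Nat))
    (hInv : pvInv bs idx) :
    (tasks.foldl pvBStep (bs, idx)).1 = tasks.foldl pvAStep bs := by
  induction tasks generalizing bs idx with
  | nil => rfl
  | cons t rest ih =>
    obtain ⟨h1, h2⟩ := pvStep_fst t bs idx hInv
    simp only [List.foldl_cons]
    rw [show pvBStep (bs, idx) t = ((pvBStep (bs, idx) t).1, (pvBStep (bs, idx) t).2) from rfl] at *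
    rw [ih _ _ h2, h1]

-- ===== VERDICT (by name: the statement is the Claim_ definition above) =====
theorem schedule_batches_spec : Claim_equal_schedule_batches := by
  intro tasks _
  unfold Spec_schedule_batches schedule_batches schedule_batches_alt
  rw [fold_eq]
  intro e i
  simp [PySem.Dict.getD_empty]
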